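-- pv_equiv track=rewrite | github.com/maxcohen31/Codewars-Solutions | Codewars/Weight_for_weight - (5 kyu).py | order_weight
-- ===== SOURCE A (Python) =====
-- def order_weight(strng):
--     strng = strng.split(' ')
--     fake_weights = {}
--     for numbers in strng:
--         sum_ = 0
--         for dig in numbers:
--             sum_ += int(dig)
--         fake_weights[numbers] = sum_
--     strng.sort()
--     strng.sort(key=lambda x: fake_weights[x])
--     return ' '.join(strng)
-- ===== SOURCE B (Python) =====
-- def order_weight(strng):
--     buckets = {}
--     for w in strng.split(' '):
--         buckets.setdefault(sum(int(d) for d in w), []).append(w)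
--     out = []
--     for s in sorted(buckets):
--         out.extend(sorted(buckets[s]))
--     return ' '.join(out)
-- ===== Notes on version B (the rewrite author's own statement) =====
-- stated objective: alternative
-- what changed: B replaces A's sort-the-whole-list-twice scheme by a bucket/group-by algorithm: it groups the words into a dict keyed by digit sum, then walks the digit sums in increasing order, sorting each bucket lexicographically and concatenating the buckets; no global sort of the word list and no per-word weight dictionary remain.
import Mathlib
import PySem

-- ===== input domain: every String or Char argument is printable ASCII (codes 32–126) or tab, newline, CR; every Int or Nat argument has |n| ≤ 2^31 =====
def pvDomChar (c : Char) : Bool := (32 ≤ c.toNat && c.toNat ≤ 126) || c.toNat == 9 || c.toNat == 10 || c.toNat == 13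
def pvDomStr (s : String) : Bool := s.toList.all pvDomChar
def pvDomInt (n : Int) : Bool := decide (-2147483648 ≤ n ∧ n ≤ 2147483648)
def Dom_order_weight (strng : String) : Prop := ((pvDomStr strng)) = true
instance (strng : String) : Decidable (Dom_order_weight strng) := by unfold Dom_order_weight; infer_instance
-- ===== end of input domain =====

-- B replaces A's two whole-list sorts and weight dictionary by a group-by-digit-sum bucket
-- algorithm (sort the weights, sort each bucket, concatenate); objective: alternative.

-- shared digit-sum helper: transliterates A's inner 'for dig in numbers: sum_ += int(dig)'
-- loop and B's 'sum(int(d) for d in w)' (the same fold in both Pythons)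
def pvW (x : String) : Int :=
  x.toList.foldl (fun s d => s + (PySem.Int.ofStr? (String.ofList [d])).getD 0) 0

-- ===== PORT A =====
def order_weight (strng : String) : String :=
  let parts := (PySem.Str.split? strng " ").getD []
  let fake_weights := parts.foldl
    (fun (fw : PySem.Dict String Int) numbers => fw.insert numbers (pvW numbers))
    PySem.Dict.empty
  let parts1 := PySem.List.sorted parts (fun x => x) false
  let parts2 := PySem.List.sorted parts1 (fun x => fake_weights.getD x 0) false
  PySem.Str.join " " parts2

-- ===== PORT B =====
def order_weight_alt (strng : String) : String :=
  let buckets := ((PySem.Str.split? strng " ").getD []).foldl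
    (fun (b : PySem.Dict Int (List String)) w => b.modify (pvW w) [] (· ++ [w]))
    PySem.Dict.empty
  let out := (PySem.List.sorted buckets.keys (fun k => k) false).foldl
    (fun acc s => acc ++ PySem.List.sorted (buckets.getD s []) (fun x => x) false) []
  PySem.Str.join " " out

-- ===== PRECONDITION & SPEC =====
-- Pre_ excludes exactly the inputs on which the Python A raises ValueError:
-- any character that is neither an ASCII digit nor the space separator makes int(dig) raise.
def Pre_order_weight (strng : String) : Prop :=
  strng.toList.all (fun c => c.isDigit || c == ' ') = true
instance (strng : String) : Decidable (Pre_order_weight strng) := by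
  unfold Pre_order_weight; infer_instance
def pvWitness_order_weight : String := "103 12 30 2000 10 1234000 44444444 9999"

def Spec_order_weight (strng : String) (out : String) : Prop := out = order_weight_alt strng
instance (strng : String) (out : String) : Decidable (Spec_order_weight strng out) := by
  unfold Spec_order_weight; infer_instance

-- ===== CLAIM (what is proved, stated in full; the proofs are below) =====
def Claim_equal_order_weight : Prop := ∀ (strng : String), Dom_order_weight strng → Pre_order_weight strng → Spec_order_weight strng (order_weight strng)

-- ===== LEMMAS AND PROOFS =====

-- the order "weight first, lexicographic among equal weights"
def pvR (a b : String) : Prop := pvW a < pvW b ∨ (pvW a = pvW b ∧ a ≤ b)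

theorem pvR_antisymm (a b : String) : pvR a b → pvR b a → a = b := by
  rintro (h1 | ⟨e1, l1⟩) (h2 | ⟨e2, l2⟩)
  · exact absurd h2 (by omega)
  · exact absurd h1 (by omega)
  · exact absurd h2 (by omega)
  · exact le_antisymm l1 l2

-- any two pvR-sorted rearrangements of the same list coincide
theorem pv_unique (l₁ l₂ : List String) (hp : l₁.Perm l₂)
    (h1 : l₁.Pairwise pvR) (h2 : l₂.Pairwise pvR) : l₁ = l₂ := by
  exact hp.eq_of_pairwise (fun a b _ _ hab hba => pvR_antisymm a b hab hba) h1 h2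

theorem pv_insertBy_nil {α : Type} (b : α → α → Bool) (x : α) :
    PySem.List.insertBy b x [] = [x] := rfl

theorem pv_insertBy_cons {α : Type} (b : α → α → Bool) (x y : α) (ys : List α) :
    PySem.List.insertBy b x (y :: ys) =
      if b x y then x :: y :: ys else y :: PySem.List.insertBy b x ys := rfl

theorem pv_insertBy_perm {α : Type} (bf : α → α → Bool) (x : α) (ys : List α) :
    (PySem.List.insertBy bf x ys).Perm (x :: ys) := by
  induction ys with
  | nil => exact List.Perm.refl _
  | cons y ys ih =>
    rw [pv_insertBy_cons]
    split
    · exact List.Perm.refl _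
    · exact (List.Perm.cons y ih).trans (List.Perm.swap x y ys)

theorem pv_foldl_insertBy_perm {α : Type} (bf : α → α → Bool) :
    ∀ (S acc : List α),
      (S.foldl (fun a x => PySem.List.insertBy bf x a) acc).Perm (S ++ acc) := by
  intro S
  induction S with
  | nil => intro acc; simp
  | cons x S ih =>
    intro acc
    refine (ih _).trans ?_
    refine (List.Perm.append_left S (pv_insertBy_perm bf x acc)).trans ?_
    exact List.perm_middle

-- stability: inserting x by weight alone into a pvR-sorted accumulator whose
-- weight-ties are all lexicographically ≤ x keeps it pvR-sorted
theorem pv_insert_pairwise (x : String) :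
    ∀ acc : List String, acc.Pairwise pvR → (∀ y ∈ acc, pvW y = pvW x → y ≤ x) →
      (PySem.List.insertBy (fun a b => decide (pvW a < pvW b)) x acc).Pairwise pvR := by
  intro acc
  induction acc with
  | nil => intro _ _; rw [pv_insertBy_nil]; exact List.pairwise_singleton _ _
  | cons y ys ih =>
    intro hpw hle
    rcases List.pairwise_cons.1 hpw with ⟨hy, hys⟩
    rw [pv_insertBy_cons]
    split
    · rename_i h
      simp only [decide_eq_true_eq] at h
      refine List.pairwise_cons.2 ⟨?_, hpw⟩
      intro z hz
      rcases List.mem_cons.1 hz with rfl | hz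
      · exact Or.inl h
      · have := hy z hz
        unfold pvR at this ⊢
        left; omega
    · rename_i h
      simp only [decide_eq_true_eq, not_lt] at h
      refine List.pairwise_cons.2 ⟨?_, ih hys (fun z hz e => hle z (by simp [hz]) e)⟩
      intro z hz
      rcases (PySem.List.mem_insertBy _ _ _ _).1 hz with rfl | hz
      · rcases lt_or_eq_of_le h with h' | h'
        · exact Or.inl h'
        · exact Or.inr ⟨h', hle y (by simp) h'⟩
      · exact hy z hz

-- A's second sort: folding the weight-only insertion over a lexicographically
-- sorted list yields a pvR-sorted list (this is where A's stability is used)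
theorem pv_fold_pairwise :
    ∀ (S1 acc : List String), S1.Pairwise (· ≤ ·) → acc.Pairwise pvR →
      (∀ y ∈ acc, ∀ x ∈ S1, pvW y = pvW x → y ≤ x) →
      (S1.foldl (fun a x => PySem.List.insertBy (fun a b => decide (pvW a < pvW b)) x a)
        acc).Pairwise pvR := by
  intro S1
  induction S1 with
  | nil => intro acc _ h _; exact h
  | cons x S1 ih =>
    intro acc hS1 hacc hle
    rcases List.pairwise_cons.1 hS1 with ⟨hx, hS1'⟩
    rw [List.foldl_cons]
    refine ih _ hS1' (pv_insert_pairwise x acc hacc (fun y hy e => hle y hy x (by simp) e)) ?_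
    intro y hy z hz e
    rcases (PySem.List.mem_insertBy _ _ _ _).1 hy with rfl | hy
    · exact hx z hz
    · exact hle y hy z (by simp [hz]) e

-- dictionary built by inserting (t, pvW t) for every t: looking up a member yields pvW
theorem pv_fw_skip (x : String) :
    ∀ (ts : List String) (d : PySem.Dict String Int), x ∉ ts →
      (ts.foldl (fun fw t => fw.insert t (pvW t)) d).getD x 0 = d.getD x 0 := by
  intro ts
  induction ts with
  | nil => intro d _; rfl
  | cons t ts ih =>
    intro d hx
    have hne : x ≠ t := fun h => hx (by simp [h])
    rw [List.foldl_cons, ih _ (fun h => hx (by simp [h])), PySem.Dict.getD_insert]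
    simp [hne]

theorem pv_fw (x : String) :
    ∀ (ts : List String) (d : PySem.Dict String Int), x ∈ ts →
      (ts.foldl (fun fw t => fw.insert t (pvW t)) d).getD x 0 = pvW x := by
  intro ts
  induction ts with
  | nil => intro d h; simp at h
  | cons t ts ih =>
    intro d hx
    by_cases hmem : x ∈ ts
    · exact ih _ hmem
    · have hxt : x = t := by rcases List.mem_cons.1 hx with h | h; exact h; exact absurd h hmem
      rw [List.foldl_cons, pv_fw_skip x ts _ hmem, PySem.Dict.getD_insert]
      simp [hxt]

-- sorting with two keys that agree on every element gives the same list
theorem pv_ins_congr {α : Type} (f g : α → Int) (x : α) :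
    ∀ L : List α, f x = g x → (∀ y ∈ L, f y = g y) →
      PySem.List.insertBy (fun a b => decide (f a < f b)) x L
        = PySem.List.insertBy (fun a b => decide (g a < g b)) x L := by
  intro L
  induction L with
  | nil => intro _ _; rfl
  | cons y L ih =>
    intro hx hL
    have hy : f y = g y := hL y (by simp)
    rw [pv_insertBy_cons, pv_insertBy_cons, hx, hy, ih hx (fun z hz => hL z (by simp [hz]))]

theorem pv_sort_congr {α : Type} (f g : α → Int) :
    ∀ (xs S : List α), (∀ y ∈ xs, f y = g y) → (∀ y ∈ S, f y = g y) →
      xs.foldl (fun acc z => PySem.List.insertBy (fun a b => decide (f a < f b)) z acc) S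
        = xs.foldl (fun acc z => PySem.List.insertBy (fun a b => decide (g a < g b)) z acc) S := by
  intro xs
  induction xs with
  | nil => intro S _ _; rfl
  | cons x xs ih =>
    intro S hxs hS
    have hx : f x = g x := hxs x (by simp)
    rw [List.foldl_cons, List.foldl_cons, pv_ins_congr f g x S hx hS]
    refine ih _ (fun y hy => hxs y (by simp [hy])) ?_
    intro y hy
    rcases (PySem.List.mem_insertBy _ _ _ _).1 hy with h | h
    · exact h ▸ hx
    · exact hS y h

-- A's output list, with the dict lookup replaced by pvW
def pvLA (parts : List String) : List String :=
  (PySem.List.sorted parts (fun x => x) false).foldl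
    (fun a x => PySem.List.insertBy (fun a b => decide (pvW a < pvW b)) x a) []

theorem pv_A_eq (parts : List String) :
    PySem.List.sorted (PySem.List.sorted parts (fun x => x) false)
      (fun x => (parts.foldl (fun fw numbers => fw.insert numbers (pvW numbers))
          PySem.Dict.empty).getD x 0) false = pvLA parts := by
  unfold pvLA
  generalize hS : PySem.List.sorted parts (fun x => x) false = S1
  rw [PySem.List.sorted_eq_foldl_insertBy]
  exact pv_sort_congr _ pvW S1 []
    (fun y hy => pv_fw y parts PySem.Dict.empty
      ((PySem.List.mem_sorted _ _ _ _).1 (hS ▸ hy)))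
    (by simp)

theorem pv_A_perm (parts : List String) : (pvLA parts).Perm parts := by
  unfold pvLA
  refine (pv_foldl_insertBy_perm _ _ []).trans ?_
  simpa using PySem.List.sorted_perm parts (fun x => x) false

theorem pv_A_pairwise (parts : List String) : (pvLA parts).Pairwise pvR := by
  unfold pvLA
  refine pv_fold_pairwise _ [] ?_ (by simp) (by simp)
  exact PySem.List.sorted_pairwise parts (fun x => x)

-- B side: the bucket dictionary's lookups and keys
theorem pv_bucket_gen (s : Int) :
    ∀ (parts : List String) (d : PySem.Dict Int (List String)),
      (parts.foldl (fun b w => b.modify (pvW w) [] (· ++ [w])) d).getD s []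
        = d.getD s [] ++ parts.filter (fun w => pvW w == s) := by
  intro parts
  induction parts with
  | nil => intro d; simp
  | cons w parts ih =>
    intro d
    rw [List.foldl_cons, ih, PySem.Dict.getD_modify, List.filter_cons]
    by_cases h : pvW w = s
    · simp [h]
    · have h' : (pvW w == s) = false := by simpa using h
      have h2 : ¬ s = pvW w := fun hh => h hh.symm
      simp [h', h2]

theorem pv_bucket (parts : List String) (s : Int) :
    ((parts.foldl (fun (b : PySem.Dict Int (List String)) w =>
        b.modify (pvW w) [] (· ++ [w])) PySem.Dict.empty).getD s [])
      = parts.filter (fun w => pvW w == s) := by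
  rw [pv_bucket_gen]
  simp

theorem pv_keys (parts : List String) :
    (parts.foldl (fun (b : PySem.Dict Int (List String)) w =>
        b.modify (pvW w) [] (· ++ [w])) PySem.Dict.empty).keys
      = PySem.Set.ofList (parts.map pvW) := by
  rw [PySem.Dict.keys_foldl_modify_key]
  rfl

-- concatenating, over a nodup key list covering all weights, the weight-s words of l
-- gives back a permutation of l
theorem pv_flatMap_congr {α β : Type} (K : List α) (f g : α → List β)
    (h : ∀ s ∈ K, f s = g s) : K.flatMap f = K.flatMap g := by
  induction K with
  | nil => rfl
  | cons s K ih =>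
    simp only [List.flatMap_cons]
    rw [h s (by simp), ih (fun t ht => h t (by simp [ht]))]

theorem pv_partition_perm :
    ∀ (K : List Int), K.Nodup → ∀ l : List String, (∀ w ∈ l, pvW w ∈ K) →
      (K.flatMap (fun s => l.filter (fun w => pvW w == s))).Perm l := by
  intro K
  induction K with
  | nil =>
    intro _ l h
    have : l = [] := List.eq_nil_iff_forall_not_mem.2 (fun w hw => by simpa using h w hw)
    simp [this]
  | cons s K ih =>
    intro hnd l h
    rcases List.nodup_cons.1 hnd with ⟨hs, hnd'⟩
    rw [List.flatMap_cons]
    have hcongr : K.flatMap (fun t => l.filter (fun w => pvW w == t))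
        = K.flatMap (fun t => (l.filter (fun w => !(pvW w == s))).filter (fun w => pvW w == t)) := by
      refine pv_flatMap_congr K _ _ ?_
      intro t ht
      rw [List.filter_filter]
      refine (List.filter_congr ?_).symm
      intro w _
      cases hwt : (pvW w == t : Bool)
      · simp
      · have : pvW w = t := by simpa using hwt
        have : ¬ (pvW w == s : Bool) = true := by
          simp only [beq_iff_eq, this]
          exact fun hst => hs (hst ▸ ht)
        simp [this]
    rw [hcongr]
    refine (List.Perm.append_left _ (ih hnd' _ ?_)).trans (List.filter_append_perm _ l)
    intro w hw
    rcases List.mem_filter.1 hw with ⟨hwl, hws⟩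
    have := h w hwl
    rcases List.mem_cons.1 this with he | hK
    · simp [he] at hws
    · exact hK

-- B's output list
def pvLB (parts : List String) : List String :=
  (PySem.List.sorted (PySem.Set.ofList (parts.map pvW)) (fun k => k) false).flatMap
    (fun s => PySem.List.sorted (parts.filter (fun w => pvW w == s)) (fun x => x) false)

theorem pv_B_eq (parts : List String) :
    (PySem.List.sorted
        (parts.foldl (fun (b : PySem.Dict Int (List String)) w =>
          b.modify (pvW w) [] (· ++ [w])) PySem.Dict.empty).keys (fun k => k) false).foldl
      (fun acc s => acc ++ PySem.List.sorted
        ((parts.foldl (fun (b : PySem.Dict Int (List String)) w =>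
          b.modify (pvW w) [] (· ++ [w])) PySem.Dict.empty).getD s []) (fun x => x) false) []
      = pvLB parts := by
  rw [PySem.List.foldl_append_eq_flatMap]
  rw [pv_keys]
  unfold pvLB
  refine pv_flatMap_congr _ _ _ ?_
  intro s _
  rw [pv_bucket]

theorem pv_B_perm (parts : List String) : (pvLB parts).Perm parts := by
  unfold pvLB
  have h1 : ((PySem.List.sorted (PySem.Set.ofList (parts.map pvW)) (fun k => k) false).flatMap
      (fun s => PySem.List.sorted (parts.filter (fun w => pvW w == s)) (fun x => x) false)).Perm
      ((PySem.List.sorted (PySem.Set.ofList (parts.map pvW)) (fun k => k) false).flatMap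
      (fun s => parts.filter (fun w => pvW w == s))) := by
    refine List.Perm.flatMap_left _ ?_
    intro s _
    exact PySem.List.sorted_perm _ _ _
  refine h1.trans ?_
  have h2 := List.Perm.flatMap_right (l₁ := PySem.List.sorted (PySem.Set.ofList (parts.map pvW)) (fun k => k) false)
      (l₂ := PySem.Set.ofList (parts.map pvW))
      (fun s => parts.filter (fun w => pvW w == s))
      (PySem.List.sorted_perm _ _ _)
  refine h2.trans ?_
  refine pv_partition_perm _ (PySem.Set.nodup_ofList _) parts ?_
  intro w hw
  exact (PySem.Set.mem_ofList _ _).2 (List.mem_map_of_mem hw)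

theorem pv_B_pairwise (parts : List String) : (pvLB parts).Pairwise pvR := by
  unfold pvLB
  rw [List.flatMap_def, List.pairwise_flatten]
  constructor
  · intro l' hl'
    rcases List.mem_map.1 hl' with ⟨s, _, rfl⟩
    have hpw := PySem.List.sorted_pairwise (parts.filter (fun w => pvW w == s)) (fun x => x)
    refine hpw.imp_of_mem ?_
    intro a b ha hb hab
    have ha' : pvW a = s := by
      have := (PySem.List.mem_sorted _ _ _ _).1 ha
      simpa using (List.mem_filter.1 this).2
    have hb' : pvW b = s := by
      have := (PySem.List.mem_sorted _ _ _ _).1 hb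
      simpa using (List.mem_filter.1 this).2
    exact Or.inr ⟨ha'.trans hb'.symm, hab⟩
  · have hK := PySem.List.sorted_ofList_pairwise_lt (parts.map pvW)
    refine (hK.map _ ?_)
    intro s t hst a ha b hb
    have ha' : pvW a = s := by
      have := (PySem.List.mem_sorted _ _ _ _).1 ha
      simpa using (List.mem_filter.1 this).2
    have hb' : pvW b = t := by
      have := (PySem.List.mem_sorted _ _ _ _).1 hb
      simpa using (List.mem_filter.1 this).2
    exact Or.inl (by rw [ha', hb']; exact hst)

-- ===== VERDICT (by name: the statement is the Claim_ definition above) =====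
theorem order_weight_spec : Claim_equal_order_weight := by
  intro strng _hdom _hpre
  unfold Spec_order_weight
  simp only [order_weight, order_weight_alt]
  rw [pv_A_eq, pv_B_eq]
  exact congrArg (PySem.Str.join " ")
    (pv_unique _ _ ((pv_A_perm _).trans (pv_B_perm _).symm) (pv_A_pairwise _) (pv_B_pairwise _))
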